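-- pv_equiv track=rewrite | github.com/volcengine/verl | atropos/environments/intern_bootcamp/internbootcamp_lib/internbootcamp/bootcamp/ddensesubsequence/ddensesubsequence.py | solve
-- ===== SOURCE A (Python) =====
-- def solve(m, s):
--     n = len(s)
--     if n == 0 or m == 0:
--         return ""
--
--     # Frequency list generation
--     sorted_chars = sorted(s)
--     freq = []
--     current_char = sorted_chars[0]
--     count = 1
--
--     for c in sorted_chars[1:]:
--         if c == current_char:
--             count += 1
--         else:
--             freq.append((current_char, count))
--             current_char = c
--             count = 1
--     freq.append((current_char, count))
--
--     # Find minimal solution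
--     for idx, (char, total) in enumerate(freq):
--         required = 0
--         last_covered = -1
--         last_candidate = -1
--         valid = True
--
--         for i in range(n):
--             if s[i] < char:
--                 last_covered = i
--                 last_candidate = i
--             elif s[i] == char:
--                 last_candidate = i
--
--             # Check window violation
--             if i - last_covered >= m:
--                 if last_candidate > last_covered:
--                     required += 1
--                     last_covered = last_candidate
--                 else:
--                     valid = False
--                     break
--
--         # Final check for the last window
--         if valid and (n - last_covered) > m:
--             valid = False
--
--         if valid:
--             # Calculate required count
--             min_chars = []
--             for c, _ in freq[:idx+1]:
--                 if c < char:
--                     min_chars.append(c)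
--             return char * required + ''.join(sorted(min_chars))
--         else:
--             continue
--
--     # Fallback to all smallest characters
--     return ''.join(sorted(s))
-- ===== SOURCE B (Python) =====
-- def _scan(m, n, c, cand):
--     # Greedy over candidate positions only: cover = last committed covered index,
--     # pend = last candidate seen. Returns number of picked '== c' positions, or None.
--     cover = -1
--     pend = -1
--     req = 0
--     for p, ch in cand:
--         if p - cover > m:
--             if pend > cover:
--                 req += 1
--                 cover = pend
--             if p - cover > m:
--                 return None
--         if ch < c:
--             cover = p
--         elif p - cover >= m:
--             req += 1
--             cover = p
--         pend = p
--     if n - cover > m: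
--         if pend > cover:
--             req += 1
--             cover = pend
--         if n - cover > m:
--             return None
--     return req
--
--
-- def solve(m, s):
--     n = len(s)
--     if n == 0 or m == 0:
--         return ""
--     dist = sorted(set(s))
--     for idx, c in enumerate(dist):
--         cand = [(i, ch) for i, ch in enumerate(s) if ch <= c]
--         req = _scan(m, n, c, cand)
--         if req is not None:
--             return c * req + ''.join(dist[:idx])
--     return ''.join(sorted(s))
-- ===== Notes on version B (the rewrite author's own statement) =====
-- stated objective: alternative
-- what changed: B replaces A's per-index scan with last_covered/last_candidate bookkeeping by a gap-based greedy over only the candidate positions (indices with s[i] <= threshold), iterates thresholds over sorted(set(s)) instead of A's run-length frequency pair list, and takes the smaller-character part of the answer as a prefix slice of that sorted distinct list instead of re-filtering and re-sorting the frequency list.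
import Mathlib
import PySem

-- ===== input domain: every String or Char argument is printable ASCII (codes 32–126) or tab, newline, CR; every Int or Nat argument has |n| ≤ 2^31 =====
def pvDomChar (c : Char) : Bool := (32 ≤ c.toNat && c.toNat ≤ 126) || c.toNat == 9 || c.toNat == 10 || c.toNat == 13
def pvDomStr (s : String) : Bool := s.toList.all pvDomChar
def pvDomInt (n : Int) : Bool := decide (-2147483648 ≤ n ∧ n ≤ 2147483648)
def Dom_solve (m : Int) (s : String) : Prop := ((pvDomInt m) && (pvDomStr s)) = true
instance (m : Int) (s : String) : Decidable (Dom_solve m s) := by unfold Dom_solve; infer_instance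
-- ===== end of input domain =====

-- B ('alternative'): instead of A's per-index scan (last_covered/last_candidate over every i),
-- B greedily scans only the candidate positions (indices with s[i] <= threshold) with gap checks,
-- iterates thresholds over sorted(set(s)) instead of a run-length frequency list, and takes the
-- smaller-character part of the answer as a prefix of that sorted distinct list.

-- ===== PORT A =====
-- A's frequency-list loop over sorted(s)[1:] (counts are built but never used afterwards)
def freqLoop : List Char → Char → Int → List (Char × Int) → List (Char × Int)
  | [], cur, cnt, acc => acc ++ [(cur, cnt)]
  | c :: rest, cur, cnt, acc =>
      if c = cur then freqLoop rest cur (cnt + 1) acc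
      else freqLoop rest c 1 (acc ++ [(cur, cnt)])

-- A's inner loop over i in range(n); state (required, last_covered, last_candidate); none = 'valid = False; break'
def scanA (m : Int) (ch : Char) : List Char → Int → Int → Int → Int → Option (Int × Int × Int)
  | [], _, req, lc, pend => some (req, lc, pend)
  | c :: rest, i, req, lc, pend =>
      let lc2 := if c < ch then i else lc
      let pend2 := if c < ch then i else if c = ch then i else pend
      if i - lc2 ≥ m then
        if pend2 > lc2 then scanA m ch rest (i + 1) (req + 1) pend2 pend2
        else none
      else scanA m ch rest (i + 1) req lc2 pend2

-- A's outer loop over enumerate(freq); none = fall through to the final return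
def loopA (m n : Int) (l : List Char) (freq : List (Char × Int)) : List (Char × Int) → Int → Option (List Char)
  | [], _ => none
  | (ch, _total) :: rest, idx =>
      match scanA m ch l 0 0 (-1) (-1) with
      | none => loopA m n l freq rest (idx + 1)
      | some (req, lc, _pend) =>
          if n - lc > m then loopA m n l freq rest (idx + 1)
          else
            let min_chars := (PySem.List.slice freq none (some (idx + 1))).foldl
              (fun acc p => if p.1 < ch then acc ++ [p.1] else acc) []
            some (PySem.List.pyRepeat [ch] req ++ PySem.List.sorted min_chars (fun x => x) false)

def solve (m : Int) (s : String) : String :=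
  let l := s.toList
  let n : Int := (l.length : Int)
  if n = 0 ∨ m = 0 then ""
  else
    match PySem.List.sorted l (fun x => x) false with
    | [] => ""   -- unreachable: n ≠ 0, and sorted(s) is a permutation of s
    | c0 :: rest =>
        let freq := freqLoop rest c0 1 []
        match loopA m n l freq freq 0 with
        | some out => String.ofList out
        | none => String.ofList (PySem.List.sorted l (fun x => x) false)

-- ===== PORT B =====
-- B's _scan loop over the candidate list (loop body unrolled over the two ways through the gap block)
def scanB (m : Int) (c : Char) : List (Int × Char) → Int → Int → Int → Option (Int × Int × Int)
  | [], req, cover, pend => some (req, cover, pend)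
  | (p, ch) :: rest, req, cover, pend =>
      if p - cover > m then
        if pend > cover then
          if p - pend > m then none
          else
            if ch < c then scanB m c rest (req + 1) p p
            else if p - pend ≥ m then scanB m c rest (req + 1 + 1) p p
            else scanB m c rest (req + 1) pend p
        else none
      else
        if ch < c then scanB m c rest req p p
        else if p - cover ≥ m then scanB m c rest (req + 1) p p
        else scanB m c rest req cover p

-- B's _scan tail: the final-window block after the loop
def finB (m n : Int) : Option (Int × Int × Int) → Option Int
  | none => none
  | some (req, cover, pend) =>
      if n - cover > m then
        if pend > cover then
          if n - pend > m then none
          else some (req + 1)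
        else none
      else some req

-- B's outer loop over enumerate(dist)
def loopB (m n : Int) (l : List Char) (dist : List Char) : List (Int × Char) → Option (List Char)
  | [] => none
  | (idx, c) :: rest =>
      let cand := (PySem.List.enumerate l 0).filter (fun q => decide (q.2 ≤ c))
      match finB m n (scanB m c cand 0 (-1) (-1)) with
      | some req => some (PySem.List.pyRepeat [c] req ++ PySem.List.slice dist none (some idx))
      | none => loopB m n l dist rest

def solve_alt (m : Int) (s : String) : String :=
  let l := s.toList
  let n : Int := (l.length : Int)
  if n = 0 ∨ m = 0 then ""
  else
    let dist := PySem.List.sorted (PySem.Set.ofList l) (fun x => x) false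
    match loopB m n l dist (PySem.List.enumerate dist 0) with
    | some out => String.ofList out
    | none => String.ofList (PySem.List.sorted l (fun x => x) false)

-- ===== PRECONDITION & SPEC =====
def Spec_solve (m : Int) (s : String) (out : String) : Prop := out = solve_alt m s
instance (m : Int) (s : String) (out : String) : Decidable (Spec_solve m s out) := by unfold Spec_solve; infer_instance

-- ===== CLAIM (what is proved, stated in full; the proofs are below) =====
def Claim_equal_solve : Prop := ∀ (m : Int) (s : String), Dom_solve m s → Spec_solve m s (solve m s)

-- ===== LEMMAS AND PROOFS =====

-- A's final-window check applied to A's scan state (proof-only helper)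
def finA (m n : Int) : Option (Int × Int × Int) → Option Int
  | none => none
  | some (req, lc, _) => if n - lc > m then none else some req

-- the sequence of distinct characters of A's frequency list (proof-only helper)
def rleFst : Char → List Char → List Char
  | cur, [] => [cur]
  | cur, c :: rest => if c = cur then rleFst cur rest else cur :: rleFst c rest

theorem freqLoop_fst (t : List Char) : ∀ (cur : Char) (cnt : Int) (acc : List (Char × Int)),
    (freqLoop t cur cnt acc).map Prod.fst = acc.map Prod.fst ++ rleFst cur t := by
  induction t with
  | nil => intro cur cnt acc; simp [freqLoop, rleFst]
  | cons c rest ih =>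
    intro cur cnt acc
    by_cases h : c = cur
    · simp [freqLoop, rleFst, h, ih]
    · simp [freqLoop, rleFst, h, ih]

theorem mem_rleFst (t : List Char) : ∀ (cur x : Char), x ∈ rleFst cur t ↔ x = cur ∨ x ∈ t := by
  induction t with
  | nil => intro cur x; simp [rleFst]
  | cons c rest ih =>
    intro cur x
    by_cases h : c = cur
    · subst h
      rw [show rleFst c (c :: rest) = rleFst c rest from by simp [rleFst]]
      rw [ih]
      simp only [List.mem_cons]
      tauto
    · simp only [rleFst, if_neg h, List.mem_cons, ih]

theorem rleFst_pairwise (t : List Char) : ∀ cur : Char, (cur :: t).Pairwise (· ≤ ·) →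
    (rleFst cur t).Pairwise (· < ·) := by
  induction t with
  | nil => intro cur _; simp [rleFst]
  | cons c rest ih =>
    intro cur hp
    rw [List.pairwise_cons] at hp
    obtain ⟨hcur, hcr⟩ := hp
    by_cases h : c = cur
    · subst h
      rw [show rleFst c (c :: rest) = rleFst c rest from by simp [rleFst]]
      apply ih
      rw [List.pairwise_cons] at hcr ⊢
      exact ⟨fun x hx => hcur x (List.mem_cons_of_mem _ hx), hcr.2⟩
    · simp only [rleFst, if_neg h]
      rw [List.pairwise_cons]
      refine ⟨?_, ih c hcr⟩
      intro x hx
      have hcc : cur < c := lt_of_le_of_ne (hcur c List.mem_cons_self) (Ne.symm h)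
      rcases (mem_rleFst rest c x).1 hx with rfl | hx'
      · exact hcc
      · exact lt_of_lt_of_le hcc ((List.pairwise_cons.1 hcr).1 x hx')

-- first components of enumerate are bounded by the start and the length
theorem enum_fst_bounds (l0 : List Char) (j : Int) (q : Int × Char)
    (hq : q ∈ PySem.List.enumerate l0 j) : j ≤ q.1 ∧ q.1 < j + l0.length := by
  rw [PySem.List.mem_enumerate_iff] at hq
  obtain ⟨k, hk, rfl⟩ := hq
  have : (k : Int) < l0.length := by exact_mod_cast hk
  constructor <;> simp <;> omega

-- finB is insensitive to A's in-between pick having been committed already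
theorem finB_insens (m n : Int) (ch : Char) (P : List (Int × Char)) (req lc pend : Int)
    (h1 : lc < pend) (h2 : ∀ q ∈ P, q.1 - lc > m) (hn : n - lc > m) :
    finB m n (scanB m ch P (req + 1) pend pend) = finB m n (scanB m ch P req lc pend) := by
  match P with
  | [] =>
    simp only [scanB, finB]
    split_ifs <;> first | rfl | omega
  | (p, c) :: rest =>
    have hp := h2 (p, c) List.mem_cons_self
    simp only at hp
    simp only [scanB]
    split_ifs <;> first | rfl | omega

-- a state with no uncommitted candidate and an overdue window is dead on the B side
theorem finB_dead (m n : Int) (ch : Char) (P : List (Int × Char)) (req lc : Int)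
    (h2 : ∀ q ∈ P, q.1 - lc > m) (hn : n - lc > m) :
    finB m n (scanB m ch P req lc lc) = none := by
  match P with
  | [] =>
    simp only [scanB, finB]
    split_ifs <;> first | rfl | omega
  | (p, c) :: rest =>
    have hp := h2 (p, c) List.mem_cons_self
    simp only at hp
    simp only [scanB]
    split_ifs <;> first | simp [finB] | omega

-- the central simulation: A's per-index scan equals B's candidate-position scan (m ≥ 1)
theorem scan_eq (m : Int) (ch : Char) (hm : 1 ≤ m) :
    ∀ (l0 : List Char) (n i req lc pend : Int), n = i + l0.length →
      -1 ≤ lc → lc ≤ pend → pend < i → i - lc ≤ m →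
      finA m n (scanA m ch l0 i req lc pend)
        = finB m n (scanB m ch ((PySem.List.enumerate l0 i).filter (fun q => decide (q.2 ≤ ch))) req lc pend) := by
  intro l0
  induction l0 with
  | nil =>
    intro n i req lc pend hn h1 h2 h3 h4
    have hng : ¬ (n - lc > m) := by simp at hn; omega
    simp [scanA, scanB, finA, finB, PySem.List.enumerate_nil, hng]
  | cons c rest ih =>
    intro n i req lc pend hn h1 h2 h3 h4
    have hn' : n = (i + 1) + rest.length := by simp at hn ⊢; omega
    rw [PySem.List.enumerate_cons]
    by_cases hc : c ≤ ch
    · -- candidate position: both scans step in lock-step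
      have hfil : ((i, c) :: PySem.List.enumerate rest (i + 1)).filter (fun q => decide (q.2 ≤ ch))
          = (i, c) :: (PySem.List.enumerate rest (i + 1)).filter (fun q => decide (q.2 ≤ ch)) := by
        simp [List.filter_cons, hc]
      rw [hfil]
      have hgap : ¬ (i - lc > m) := by omega
      rcases lt_or_eq_of_le hc with hlt | heq
      · have hne : ¬ (c = ch) := ne_of_lt hlt
        have hA : scanA m ch (c :: rest) i req lc pend = scanA m ch rest (i + 1) req i i := by
          have hm0 : ¬ m ≤ 0 := by omega
          simp [scanA, hlt, hm0]
        have hB : scanB m ch ((i, c) :: (PySem.List.enumerate rest (i + 1)).filter (fun q => decide (q.2 ≤ ch))) req lc pend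
            = scanB m ch ((PySem.List.enumerate rest (i + 1)).filter (fun q => decide (q.2 ≤ ch))) req i i := by
          simp [scanB, hgap, hlt]
        rw [hA, hB]
        exact ih n (i + 1) req i i hn' (by omega) le_rfl (by omega) (by omega)
      · subst heq
        have hnlt : ¬ (c < c) := lt_irrefl c
        by_cases htr : i - lc ≥ m
        · have hA : scanA m c (c :: rest) i req lc pend = scanA m c rest (i + 1) (req + 1) i i := by
            simp [scanA, hnlt, htr, show i > lc by omega]
          have hB : scanB m c ((i, c) :: (PySem.List.enumerate rest (i + 1)).filter (fun q => decide (q.2 ≤ c))) req lc pend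
              = scanB m c ((PySem.List.enumerate rest (i + 1)).filter (fun q => decide (q.2 ≤ c))) (req + 1) i i := by
            simp [scanB, hgap, hnlt, htr]
          rw [hA, hB]
          exact ih n (i + 1) (req + 1) i i hn' (by omega) le_rfl (by omega) (by omega)
        · have hA : scanA m c (c :: rest) i req lc pend = scanA m c rest (i + 1) req lc i := by
            simp [scanA, hnlt, htr]
          have hB : scanB m c ((i, c) :: (PySem.List.enumerate rest (i + 1)).filter (fun q => decide (q.2 ≤ c))) req lc pend
              = scanB m c ((PySem.List.enumerate rest (i + 1)).filter (fun q => decide (q.2 ≤ c))) req lc i := by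
            simp [scanB, hgap, hnlt, htr]
          rw [hA, hB]
          exact ih n (i + 1) req lc i hn' h1 (by omega) (by omega) (by omega)
    · -- non-candidate position: A may trigger here; B defers to the next candidate
      have hfil : ((i, c) :: PySem.List.enumerate rest (i + 1)).filter (fun q => decide (q.2 ≤ ch))
          = (PySem.List.enumerate rest (i + 1)).filter (fun q => decide (q.2 ≤ ch)) := by
        simp [List.filter_cons, hc]
      rw [hfil]
      have hnlt : ¬ (c < ch) := fun h => hc (le_of_lt h)
      have hne : ¬ (c = ch) := fun h => hc (le_of_eq h)
      by_cases htr : i - lc ≥ m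
      · have hieq : i - lc = m := by omega
        by_cases hpk : pend > lc
        · have hA : scanA m ch (c :: rest) i req lc pend = scanA m ch rest (i + 1) (req + 1) pend pend := by
            simp [scanA, hnlt, hne, htr, hpk]
          rw [hA]
          rw [ih n (i + 1) (req + 1) pend pend hn' (by omega) le_rfl (by omega) (by omega)]
          apply finB_insens m n ch _ req lc pend hpk
          · intro q hq
            have := enum_fst_bounds rest (i + 1) q (List.mem_of_mem_filter hq)
            omega
          · simp at hn'; omega
        · have hpe : pend = lc := by omega
          have hA : scanA m ch (c :: rest) i req lc pend = none := by
            simp [scanA, hnlt, hne, htr, hpk]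
          rw [hA, hpe]
          refine Eq.symm (finB_dead m n ch _ req lc ?_ ?_)
          · intro q hq
            have := enum_fst_bounds rest (i + 1) q (List.mem_of_mem_filter hq)
            omega
          · simp at hn'; omega
      · have hA : scanA m ch (c :: rest) i req lc pend = scanA m ch rest (i + 1) req lc pend := by
          simp [scanA, hnlt, hne, htr]
        rw [hA]
        exact ih n (i + 1) req lc pend hn' h1 h2 (by omega) (by omega)

theorem scanA_neg (m : Int) (ch : Char) (hm : m < 0) :
    ∀ (l0 : List Char) (n i req lc pend : Int), n = i + l0.length → lc ≤ i - 1 → pend ≤ i - 1 →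
      finA m n (scanA m ch l0 i req lc pend) = none := by
  intro l0
  induction l0 with
  | nil =>
    intro n i req lc pend hn h1 h2
    have : n - lc > m := by simp at hn; omega
    simp [scanA, finA, this]
  | cons c rest ih =>
    intro n i req lc pend hn h1 h2
    have hn' : n = (i + 1) + rest.length := by simp at hn ⊢; omega
    show finA m n (scanA m ch (c :: rest) i req lc pend) = none
    simp only [scanA]
    split_ifs <;>
      first
      | rfl
      | (apply ih n (i + 1) <;> omega)

theorem scanB_neg (m n : Int) (ch : Char) (hm : m < 0) :
    ∀ (P : List (Int × Char)) (req cover pend : Int), cover ≤ n - 1 → pend ≤ n - 1 →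
      (∀ q ∈ P, q.1 ≤ n - 1) →
      finB m n (scanB m ch P req cover pend) = none := by
  intro P
  induction P with
  | nil =>
    intro req cover pend h1 h2 h3
    simp only [scanB, finB]
    split_ifs <;> first | rfl | omega
  | cons q rest ih =>
    obtain ⟨p, c⟩ := q
    intro req cover pend h1 h2 h3
    have hp : p ≤ n - 1 := h3 (p, c) List.mem_cons_self
    have h3' : ∀ q ∈ rest, q.1 ≤ n - 1 := fun q hq => h3 q (List.mem_cons_of_mem _ hq)
    simp only [scanB]
    split_ifs <;> first | rfl | (apply ih <;> omega) | (exact ih _ _ _ h1 hp h3') | (exact ih _ _ _ (by omega) hp h3')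

-- per-threshold agreement for every m ≠ 0
theorem perchar (m : Int) (hm : m ≠ 0) (ch : Char) (l : List Char) :
    finB m (l.length : Int) (scanB m ch ((PySem.List.enumerate l 0).filter (fun q => decide (q.2 ≤ ch))) 0 (-1) (-1))
      = finA m (l.length : Int) (scanA m ch l 0 0 (-1) (-1)) := by
  rcases lt_trichotomy m 0 with hneg | hz | hpos
  · rw [scanA_neg m ch hneg l (l.length : Int) 0 0 (-1) (-1) (by simp) (by omega) (by omega)]
    apply scanB_neg m (l.length : Int) ch hneg _ 0 (-1) (-1) (by omega) (by omega)
    intro q hq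
    have := enum_fst_bounds l 0 q (List.mem_of_mem_filter hq)
    omega
  · exact absurd hz hm
  · exact (scan_eq m ch (by omega) l (l.length : Int) 0 0 (-1) (-1) (by simp) (by omega) le_rfl (by omega) (by omega)).symm

-- the two outer loops agree step by step
theorem outer (m : Int) (l : List Char) (hm : m ≠ 0) (freq : List (Char × Int)) (dist : List Char)
    (hd : dist = freq.map Prod.fst) (hp : dist.Pairwise (· < ·)) :
    ∀ (fsuf pfreq : List (Char × Int)), freq = pfreq ++ fsuf →
      loopA m (l.length : Int) l freq fsuf (pfreq.length : Int)
        = loopB m (l.length : Int) l dist (PySem.List.enumerate (fsuf.map Prod.fst) (pfreq.length : Int)) := by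
  intro fsuf
  induction fsuf with
  | nil =>
    intro pfreq hfr
    simp [loopA, loopB, PySem.List.enumerate_nil]
  | cons hd0 ftail ih =>
    obtain ⟨ch, tot⟩ := hd0
    intro pfreq hfr
    rw [List.map_cons, PySem.List.enumerate_cons]
    simp only [loopA, loopB]
    rw [perchar m hm ch l]
    have IH := ih (pfreq ++ [(ch, tot)]) (by rw [hfr]; simp)
    simp only [List.length_append, List.length_cons, List.length_nil, Nat.cast_add,
      Nat.cast_one, Nat.cast_zero, zero_add] at IH
    cases hs : scanA m ch l 0 0 (-1) (-1) with
    | none => simpa [finA] using IH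
    | some st =>
      obtain ⟨req, lc, pend⟩ := st
      by_cases hcov : (l.length : Int) - lc > m
      · simpa [finA, hcov] using IH
      · simp only [finA, if_neg hcov]
        -- both return: show the two appended tails agree
        have hfrfst : dist = pfreq.map Prod.fst ++ ch :: ftail.map Prod.fst := by
          rw [hd, hfr]; simp
        have hsmall : ∀ q ∈ pfreq, q.1 < ch := by
          intro q hq
          have hmem : q.1 ∈ pfreq.map Prod.fst := List.mem_map_of_mem hq
          have := (List.pairwise_append.1 (hfrfst ▸ hp)).2.2 q.1 hmem ch List.mem_cons_self
          exact this
        have hslice : PySem.List.slice freq none (some ((pfreq.length : Int) + 1))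
            = pfreq ++ [(ch, tot)] := by
          have : ((pfreq.length : Int) + 1) = ((pfreq.length + 1 : Nat) : Int) := by push_cast; ring
          rw [this, PySem.List.slice_to_natCast, hfr]
          rw [show pfreq.length + 1 = (pfreq ++ [(ch, tot)]).length by simp]
          rw [show pfreq ++ (ch, tot) :: ftail = (pfreq ++ [(ch, tot)]) ++ ftail by simp]
          exact List.take_left
        have hmin : (PySem.List.slice freq none (some ((pfreq.length : Int) + 1))).foldl
              (fun acc p => if p.1 < ch then acc ++ [p.1] else acc) []
            = pfreq.map Prod.fst := by
          rw [hslice, PySem.List.foldl_append_ite (p := fun p : Char × Int => p.1 < ch) (f := Prod.fst)]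
          rw [List.filter_append]
          rw [List.filter_eq_self.2 (fun q hq => by simpa using hsmall q hq)]
          simp
        have hsorted : PySem.List.sorted (pfreq.map Prod.fst) (fun x => x) false
            = pfreq.map Prod.fst := by
          apply PySem.List.sorted_eq_self_of_pairwise
          have := (List.pairwise_append.1 (hfrfst ▸ hp)).1
          exact this.imp le_of_lt
        have hsliceB : PySem.List.slice dist none (some (pfreq.length : Int))
            = pfreq.map Prod.fst := by
          rw [PySem.List.slice_to_natCast, hfrfst]
          rw [show pfreq.length = (pfreq.map Prod.fst).length by simp]
          exact List.take_left
        rw [hmin, hsorted, hsliceB]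
  

-- ===== VERDICT (by name: the statement is the Claim_ definition above) =====
theorem solve_spec : Claim_equal_solve := by
  intro m s _
  unfold Spec_solve solve solve_alt
  by_cases hg : ((s.toList.length : Int) = 0 ∨ m = 0)
  · simp only [if_pos hg]
  · simp only [if_neg hg]
    have hm : m ≠ 0 := fun h => hg (Or.inr h)
    have hl : s.toList ≠ [] := by
      intro h
      exact hg (Or.inl (by simp [h]))
    have hs : PySem.List.sorted s.toList (fun x => x) false ≠ [] := by
      intro h
      apply hl
      rwa [PySem.List.sorted_eq_nil_iff] at h
    obtain ⟨c0, rest, hsc⟩ := List.exists_cons_of_ne_nil hs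
    rw [hsc]
    have hpw0 : (c0 :: rest).Pairwise (· ≤ ·) := by
      have := PySem.List.sorted_pairwise (xs := s.toList) (key := fun x => x) ; rw [hsc] at this
      exact this
    have hpw : (rleFst c0 rest).Pairwise (· < ·) := rleFst_pairwise rest c0 hpw0
    have hfst : (freqLoop rest c0 1 []).map Prod.fst = rleFst c0 rest := by
      rw [freqLoop_fst]; simp
    have hdist : PySem.List.sorted (PySem.Set.ofList s.toList) (fun x => x) false = rleFst c0 rest := by
      apply PySem.List.sorted_eq_of_perm_of_pairwise_lt
      · rw [List.perm_ext_iff_of_nodup (hpw.imp ne_of_lt) (PySem.Set.nodup_ofList _)]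
        intro a
        rw [mem_rleFst, PySem.Set.mem_ofList]
        have : a ∈ s.toList ↔ a ∈ PySem.List.sorted s.toList (fun x => x) false :=
          (PySem.List.mem_sorted s.toList (fun x => x) false a).symm
        rw [this, hsc]
        simp
      · exact hpw
    rw [hdist]
    have := outer m s.toList hm (freqLoop rest c0 1 []) (rleFst c0 rest) hfst.symm hpw
      (freqLoop rest c0 1 []) [] (by simp)
    simp only [List.length_nil, Nat.cast_zero, hfst] at this
    show (match loopA m (s.toList.length : Int) s.toList (freqLoop rest c0 1 []) (freqLoop rest c0 1 []) 0 with
      | some out => String.ofList out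
      | none => String.ofList (c0 :: rest)) = _
    rw [this]
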